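-- pv_equiv track=rewrite | github.com/pypi-data/pypi-mirror-403 | packages/urban-worm/urban_worm-0.1.2.tar.gz/urban_worm-0.1.2/urbanworm/utils/utils.py | pick_best_gguf
-- ===== SOURCE A (Python) =====
-- from typing import Sequence
--
-- def pick_best_gguf(files: Sequence[str], prefer: Sequence[str]) -> str:
--     # Main model: endswith .gguf and NOT mmproj
--     candidates = [f for f in files if f.lower().endswith(".gguf") and "mmproj" not in f.lower()]
--     if not candidates:
--         raise FileNotFoundError("No model .gguf found in repo (excluding mmproj).")
--
--     # Prefer quant strings in filename
--     for p in prefer: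
--         for f in candidates:
--             if p.lower() in f.lower():
--                 return f
--
--     # Fallback: shortest name (often the "default"), else first
--     candidates_sorted = sorted(candidates, key=lambda x: (len(x), x))
--     return candidates_sorted[0]
-- ===== SOURCE B (Python) =====
-- from typing import Sequence
--
-- def pick_best_gguf(files: Sequence[str], prefer: Sequence[str]) -> str:
--     # Same candidate filter and empty-candidates error as the original.
--     candidates = [f for f in files if f.lower().endswith(".gguf") and "mmproj" not in f.lower()]
--     if not candidates:
--         raise FileNotFoundError("No model .gguf found in repo (excluding mmproj).")
--
--     # Rank each candidate by the highest-priority prefer string it contains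
--     # (sentinel len(prefer) when none), then take the stable minimum: this
--     # replaces the nested prefer-then-candidates loop with a single min pass.
--     n = len(prefer)
--
--     def rank(f: str) -> int:
--         fl = f.lower()
--         return next((i for i, p in enumerate(prefer) if p.lower() in fl), n)
--
--     best = min(candidates, key=rank)
--     if rank(best) < n:
--         return best
--
--     # Fallback: shortest name (often the "default"), else first
--     return sorted(candidates, key=lambda x: (len(x), x))[0]
-- ===== Notes on version B (the rewrite author's own statement) =====
-- stated objective: alternative
-- what changed: The nested prefer-then-candidates loop is replaced by computing each candidate's rank (index of the first matching prefer string, sentinel len(prefer)) and taking the stable minimum by rank; the candidate filter, the FileNotFoundError on no candidates, and the (len, name) fallback are unchanged.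
import Mathlib
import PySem

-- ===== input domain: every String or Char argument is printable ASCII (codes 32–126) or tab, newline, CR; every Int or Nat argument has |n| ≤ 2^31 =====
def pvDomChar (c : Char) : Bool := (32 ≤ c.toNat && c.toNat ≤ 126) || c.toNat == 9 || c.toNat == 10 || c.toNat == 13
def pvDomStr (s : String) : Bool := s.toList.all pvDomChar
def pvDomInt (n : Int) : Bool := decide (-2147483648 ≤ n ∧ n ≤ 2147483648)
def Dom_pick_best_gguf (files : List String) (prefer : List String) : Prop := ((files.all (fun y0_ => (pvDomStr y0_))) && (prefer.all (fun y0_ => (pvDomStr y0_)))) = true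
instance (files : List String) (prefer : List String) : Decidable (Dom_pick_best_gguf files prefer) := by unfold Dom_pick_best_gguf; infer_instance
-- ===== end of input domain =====

-- B replaces A's nested prefer-then-candidates loop by ranking each candidate
-- (index of its first matching prefer string) and taking the stable minimum by
-- rank; filter, error on no candidates, and the (len, name) fallback unchanged.


-- shared helpers: these expressions occur verbatim in BOTH Pythons
-- f.lower().endswith(".gguf") and "mmproj" not in f.lower()
def pvCand (f : String) : Bool :=
  PySem.Str.endswith (PySem.Str.lower f) ".gguf" && !(PySem.Str.isIn "mmproj" (PySem.Str.lower f))

-- p.lower() in f.lower()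
def pvMatch (p f : String) : Bool := PySem.Str.isIn (PySem.Str.lower p) (PySem.Str.lower f)

-- sorted(candidates, key=lambda x: (len(x), x))[0]  (identical fallback line in A and B)
def pvFallback (cands : List String) : String :=
  (PySem.List.sorted2 cands (fun x => PySem.Str.len x) (fun x => x)).headD ""

-- ===== PORT A =====
-- inner loop: for f in candidates: if p.lower() in f.lower(): return f
def pvLoopF (p : String) : List String → Option String
  | [] => none
  | f :: fs => if pvMatch p f then some f else pvLoopF p fs

-- outer loop: for p in prefer: …
def pvLoopP (cands : List String) : List String → Option String
  | [] => none
  | p :: ps =>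
    match pvLoopF p cands with
    | some f => some f
    | none => pvLoopP cands ps

def pick_best_gguf (files : List String) (prefer : List String) : String :=
  let candidates := files.filter pvCand
  -- 'if not candidates: raise FileNotFoundError' is excluded by Pre_; "" stands for the raise
  match pvLoopP candidates prefer with
  | some f => f
  | none => pvFallback candidates

-- ===== PORT B =====
-- rank(f) = next((i for i, p in enumerate(prefer) if p.lower() in f.lower()), len(prefer))
def pvRank (prefer : List String) (f : String) : Nat :=
  prefer.findIdx (fun p => pvMatch p f)

def pick_best_gguf_alt (files : List String) (prefer : List String) : String :=
  let candidates := files.filter pvCand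
  match PySem.List.min? candidates (pvRank prefer) with
  | none => ""   -- candidates empty: the Python raises (excluded by Pre_)
  | some best =>
    if pvRank prefer best < prefer.length then best
    else pvFallback candidates

-- ===== PRECONDITION & SPEC =====
-- Pre_ excludes exactly the inputs with no candidate file (a .gguf not containing
-- "mmproj", case-insensitively), on which both Pythons raise FileNotFoundError.
def Pre_pick_best_gguf (files : List String) (prefer : List String) : Prop :=
  ∃ f ∈ files, pvCand f = true
instance (files : List String) (prefer : List String) : Decidable (Pre_pick_best_gguf files prefer) := by
  unfold Pre_pick_best_gguf; infer_instance

def pvWitness_pick_best_gguf : List String × List String := (["model.Q4.gguf", "model.Q8.gguf"], ["q8"])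

def Spec_pick_best_gguf (files : List String) (prefer : List String) (out : String) : Prop := out = pick_best_gguf_alt files prefer
instance (files : List String) (prefer : List String) (out : String) : Decidable (Spec_pick_best_gguf files prefer out) := by unfold Spec_pick_best_gguf; infer_instance

-- ===== CLAIM (what is proved, stated in full; the proofs are below) =====
def Claim_equal_pick_best_gguf : Prop := ∀ (files : List String) (prefer : List String), Dom_pick_best_gguf files prefer → Pre_pick_best_gguf files prefer → Spec_pick_best_gguf files prefer (pick_best_gguf files prefer)

-- ===== LEMMAS AND PROOFS =====

-- A's inner loop is List.find?
theorem pvLoopF_eq_find? (p : String) (l : List String) :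
    pvLoopF p l = l.find? (fun f => pvMatch p f) := by
  induction l with
  | nil => rfl
  | cons f fs ih => by_cases h : pvMatch p f <;> simp [pvLoopF, h, ih]

-- the stable-min fold behind PySem.List.min? once the list is nonempty
def pvMF (r : String → Nat) (b : String) (l : List String) : String :=
  l.foldl (fun m x => if r x < r m then x else m) b

theorem min?_cons_eq_pvMF (r : String → Nat) : ∀ (cs : List String) (c : String),
    PySem.List.min? (c :: cs) r = some (pvMF r c cs) := by
  intro cs
  induction cs with
  | nil => intro c; rfl
  | cons x xs ih =>
    intro c
    have hstep : PySem.List.min? (c :: x :: xs) r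
        = PySem.List.min? ((if r x < r c then x else c) :: xs) r := by
      by_cases h : r x < r c <;> simp [PySem.List.min?, List.foldl_cons, h]
    rw [hstep, ih]
    by_cases h : r x < r c <;> simp [pvMF, List.foldl_cons, h]

theorem pvMF_zero (r : String → Nat) (b : String) (l : List String) (hb : r b = 0) :
    pvMF r b l = b := by
  induction l with
  | nil => rfl
  | cons x xs ih =>
    have hx : ¬ r x < r b := by omega
    simpa [pvMF, List.foldl_cons, hx] using ih

theorem pvMF_first_zero (r : String → Nat) (l2 : List String) (f0 : String) (hf : r f0 = 0) :
    ∀ (l1 : List String) (b : String), (∀ x ∈ b :: l1, 0 < r x) →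
      pvMF r b (l1 ++ f0 :: l2) = f0 := by
  intro l1
  induction l1 with
  | nil =>
    intro b hpos
    have hb : 0 < r b := hpos b (by simp)
    have : r f0 < r b := by omega
    simp only [List.nil_append, pvMF, List.foldl_cons, this, if_pos]
    exact pvMF_zero r f0 l2 hf
  | cons x xs ih =>
    intro b hpos
    simp only [List.cons_append, pvMF, List.foldl_cons]
    have hnext : ∀ y ∈ (if r x < r b then x else b) :: xs, 0 < r y := by
      intro y hy
      rcases List.mem_cons.mp hy with hy | hy
      · subst hy
        split <;> [exact hpos x (by simp); exact hpos b (by simp)]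
      · exact hpos y (by simp [hy])
    have := ih (if r x < r b then x else b) hnext
    simpa [pvMF] using this

theorem pvMF_congr (r s : String → Nat) :
    ∀ (l : List String) (b : String), (∀ x ∈ b :: l, r x = s x) →
      pvMF r b l = pvMF s b l := by
  intro l
  induction l with
  | nil => intro b _; rfl
  | cons x xs ih =>
    intro b h
    have hb : r b = s b := h b (by simp)
    have hx : r x = s x := h x (by simp)
    simp only [pvMF, List.foldl_cons]
    have hif : (if r x < r b then x else b) = (if s x < s b then x else b) := by
      by_cases hlt : r x < r b
      · rw [if_pos hlt, if_pos (by omega)]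
      · rw [if_neg hlt, if_neg (by omega)]
    rw [← hif]
    have hnext : ∀ y ∈ (if r x < r b then x else b) :: xs, r y = s y := by
      intro y hy
      rcases List.mem_cons.mp hy with hy | hy
      · subst hy; split <;> [exact hx; exact hb]
      · exact h y (by simp [hy])
    have := ih (if r x < r b then x else b) hnext
    simpa [pvMF, hif] using this

theorem pvMF_shift (s : String → Nat) :
    ∀ (l : List String) (b : String), pvMF (fun x => s x + 1) b l = pvMF s b l := by
  intro l
  induction l with
  | nil => intro b; rfl
  | cons x xs ih =>
    intro b
    simp only [pvMF, List.foldl_cons]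
    have hif : (if s x + 1 < s b + 1 then x else b) = (if s x < s b then x else b) := by
      by_cases h : s x < s b
      · rw [if_pos (by omega), if_pos h]
      · rw [if_neg (by omega), if_neg h]
    rw [hif]
    exact ih (if s x < s b then x else b)

-- rank facts
theorem pvRank_cons_of_match (p : String) (ps : List String) (f : String) (h : pvMatch p f = true) :
    pvRank (p :: ps) f = 0 := by simp [pvRank, List.findIdx_cons, h]

theorem pvRank_cons_of_not_match (p : String) (ps : List String) (f : String) (h : pvMatch p f = false) :
    pvRank (p :: ps) f = pvRank ps f + 1 := by simp [pvRank, List.findIdx_cons, h]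

-- core: A's loop finding f means B's stable min is f, with rank below the sentinel
theorem loop_some_min (prefer : List String) :
    ∀ (cands : List String) (f : String), pvLoopP cands prefer = some f →
      PySem.List.min? cands (pvRank prefer) = some f ∧ pvRank prefer f < prefer.length := by
  induction prefer with
  | nil => intro cands f h; simp [pvLoopP] at h
  | cons p ps ih =>
    intro cands f h
    simp only [pvLoopP] at h
    cases hF : pvLoopF p cands with
    | some g =>
      rw [hF] at h
      cases h
      rw [pvLoopF_eq_find?] at hF
      obtain ⟨hg, l1, l2, hc, hall⟩ := List.find?_eq_some_iff_append.mp hF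
      have hf0 : pvRank (p :: ps) f = 0 := pvRank_cons_of_match p ps f hg
      constructor
      · cases l1 with
        | nil =>
          simp only [hc, List.nil_append]
          rw [min?_cons_eq_pvMF, pvMF_zero _ _ _ hf0]
        | cons b l1' =>
          simp only [hc, List.cons_append]
          rw [min?_cons_eq_pvMF, pvMF_first_zero (pvRank (p :: ps)) l2 f hf0 l1' b ?_]
          intro x hx
          have hxm : pvMatch p x = false := by
            simpa using hall x (by simpa using hx)
          rw [pvRank_cons_of_not_match p ps x hxm]; omega
      · simp [hf0]
    | none =>
      rw [hF] at h
      rw [pvLoopF_eq_find?] at hF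
      have hno : ∀ x ∈ cands, pvMatch p x = false := by
        intro x hx
        simpa using List.find?_eq_none.mp hF x hx
      obtain ⟨hmin, hlt⟩ := ih cands f h
      have hmem : f ∈ cands := PySem.List.min?_mem hmin
      cases cands with
      | nil => simp at hmem
      | cons c cs =>
        constructor
        · rw [min?_cons_eq_pvMF]
          rw [min?_cons_eq_pvMF] at hmin
          have h1 : pvMF (pvRank (p :: ps)) c cs = pvMF (fun x => pvRank ps x + 1) c cs :=
            pvMF_congr _ _ cs c (by intro x hx; exact pvRank_cons_of_not_match p ps x (hno x hx))
          rw [h1, pvMF_shift]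
          exact hmin
        · rw [pvRank_cons_of_not_match p ps f (hno f hmem)]
          simpa using Nat.succ_lt_succ hlt

-- core: A's loop finding nothing means every candidate has the sentinel rank
theorem loop_none_rank (prefer : List String) (cands : List String)
    (h : pvLoopP cands prefer = none) :
    ∀ x ∈ cands, pvRank prefer x = prefer.length := by
  intro x hx
  apply List.findIdx_eq_length.mpr
  intro p hp
  induction prefer with
  | nil => simp at hp
  | cons q qs ih =>
    simp only [pvLoopP] at h
    cases hF : pvLoopF q cands with
    | some g => rw [hF] at h; simp at h
    | none =>
      rw [hF] at h
      rw [pvLoopF_eq_find?] at hF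
      rcases List.mem_cons.mp hp with hp | hp
      · subst hp
        simpa using List.find?_eq_none.mp hF x hx
      · exact ih h hp

-- ===== VERDICT (by name: the statement is the Claim_ definition above) =====
theorem pick_best_gguf_spec : Claim_equal_pick_best_gguf := by
  intro files prefer _ hpre
  unfold Spec_pick_best_gguf pick_best_gguf pick_best_gguf_alt
  dsimp only
  obtain ⟨f0, hf0mem, hf0⟩ := hpre
  have hne : files.filter pvCand ≠ [] := by
    intro h
    exact absurd hf0 (by simpa using List.filter_eq_nil_iff.mp h f0 hf0mem)
  cases hl : pvLoopP (files.filter pvCand) prefer with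
  | some f =>
    obtain ⟨hmin, hlt⟩ := loop_some_min prefer (files.filter pvCand) f hl
    simp [hmin, hlt]
  | none =>
    cases hcs : files.filter pvCand with
    | nil => exact absurd hcs hne
    | cons c cs =>
      have hall := loop_none_rank prefer (files.filter pvCand) hl
      rw [hcs] at hall hl
      rw [min?_cons_eq_pvMF]
      have hmem : pvMF (pvRank prefer) c cs ∈ c :: cs :=
        PySem.List.min?_mem (min?_cons_eq_pvMF (pvRank prefer) cs c)
      have hr : pvRank prefer (pvMF (pvRank prefer) c cs) = prefer.length := hall _ hmem
      simp [hr]
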